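-- pv_equiv track=rewrite | github.com/weakfisher/Programacion-2 | Proyecto/proyectov2.py | validarCoordX
-- ===== SOURCE A (Python) =====
-- def validarCoordX(coordX):
--     a = ["A","B","C","D","E","F","G","H"]
--
--
--     for i in a:
--         if type(coordX) == str:
--             if coordX.upper() == i :
--                 coordFinal = a.index(i)
--                 return True
--     else: return False
-- ===== SOURCE B (Python) =====
-- def validarCoordX(coordX):
--     if type(coordX) != str:
--         return False
--     c = coordX.upper()
--     return len(c) == 1 and 'A' <= c <= 'H'
-- ===== Notes on version B (the rewrite author's own statement) =====
-- stated objective: idiomatic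
-- what changed: Replaced the loop over an enumerated 8-letter table (with an unused list.index call) by a closed-form test: uppercase once, check length 1 and the ordinal range 'A' <= c <= 'H'.
import Mathlib
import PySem

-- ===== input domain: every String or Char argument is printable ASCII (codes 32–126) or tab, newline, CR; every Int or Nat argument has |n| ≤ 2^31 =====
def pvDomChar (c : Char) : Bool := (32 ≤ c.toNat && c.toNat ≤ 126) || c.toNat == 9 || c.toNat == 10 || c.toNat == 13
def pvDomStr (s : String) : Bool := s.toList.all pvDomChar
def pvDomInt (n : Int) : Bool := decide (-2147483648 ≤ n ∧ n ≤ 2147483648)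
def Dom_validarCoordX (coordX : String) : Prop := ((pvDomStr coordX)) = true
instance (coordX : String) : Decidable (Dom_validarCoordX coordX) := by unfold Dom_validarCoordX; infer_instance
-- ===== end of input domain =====

-- B replaces A's scan of an enumerated 8-letter table by a closed-form test
-- (uppercase once, length-1 check, ordinal range 'A' ≤ c ≤ 'H'); objective: idiomatic.

-- ===== PORT A =====
-- the for-loop with early 'return True' and final 'return False'
def validarCoordXLoop (coordX : String) : List String → Bool
  | [] => false
  | i :: rest =>
      if PySem.Str.upper coordX == i then true
      else validarCoordXLoop coordX rest

def validarCoordX (coordX : String) : Bool :=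
  validarCoordXLoop coordX ["A","B","C","D","E","F","G","H"]

-- ===== PORT B =====
-- Python string comparison 'A' <= c <= 'H' is code-point lexicographic ≤, ported on toList (exact)
def validarCoordX_alt (coordX : String) : Bool :=
  let c := PySem.Str.upper coordX
  (PySem.Str.len c == 1) && decide (['A'] ≤ c.toList) && decide (c.toList ≤ ['H'])

-- ===== PRECONDITION & SPEC =====
def Spec_validarCoordX (coordX : String) (out : Bool) : Prop := out = validarCoordX_alt coordX
instance (coordX : String) (out : Bool) : Decidable (Spec_validarCoordX coordX out) := by unfold Spec_validarCoordX; infer_instance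

-- ===== CLAIM (what is proved, stated in full; the proofs are below) =====
def Claim_equal_validarCoordX : Prop := ∀ (coordX : String), Dom_validarCoordX coordX → Spec_validarCoordX coordX (validarCoordX coordX)

-- ===== LEMMAS AND PROOFS =====

theorem string_eq_iff_toList (s t : String) : (s = t) ↔ s.toList = t.toList :=
  ⟨fun h => h ▸ rfl, fun h => String.ext h⟩

theorem validarCoordXLoop_eq_any (coordX : String) (l : List String) :
    validarCoordXLoop coordX l = l.any (fun i => PySem.Str.upper coordX == i) := by
  induction l with
  | nil => rfl
  | cons i rest ih =>
    by_cases h : PySem.Str.upper coordX = i <;> simp [validarCoordXLoop, ih, h]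

theorem singleton_le_singleton (a b : Char) : ([a] ≤ [b]) ↔ (a ≤ b) := by
  simp [le_iff_lt_or_eq, List.cons_lt_cons_iff]

theorem char_range_of_ne (c : Char) (h1 : c ≠ 'A') (h2 : c ≠ 'B') (h3 : c ≠ 'C')
    (h4 : c ≠ 'D') (h5 : c ≠ 'E') (h6 : c ≠ 'F') (h7 : c ≠ 'G') (h8 : c ≠ 'H') :
    ¬ ('A' ≤ c ∧ c ≤ 'H') := by
  rintro ⟨ha, hb⟩
  simp [Char.le_def, UInt32.le_iff_toNat_le] at ha hb
  simp [Char.ext_iff, UInt32.ext_iff] at h1 h2 h3 h4 h5 h6 h7 h8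
  omega

theorem validarCoordX_eq_alt (coordX : String) :
    validarCoordX coordX = validarCoordX_alt coordX := by
  unfold validarCoordX validarCoordX_alt
  rw [validarCoordXLoop_eq_any]
  rw [Bool.eq_iff_iff]
  simp only [List.any_cons, List.any_nil, Bool.or_eq_true, Bool.or_false, beq_iff_eq,
    string_eq_iff_toList, Bool.and_eq_true, decide_eq_true_eq, PySem.Str.len]
  simp only [show "A".toList = ['A'] from rfl, show "B".toList = ['B'] from rfl,
    show "C".toList = ['C'] from rfl, show "D".toList = ['D'] from rfl,
    show "E".toList = ['E'] from rfl, show "F".toList = ['F'] from rfl,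
    show "G".toList = ['G'] from rfl, show "H".toList = ['H'] from rfl]
  cases h : (PySem.Str.upper coordX).toList with
  | nil => simp
  | cons c rest =>
    cases rest with
    | cons d rest' =>
      constructor
      · rintro (h' | h' | h' | h' | h' | h' | h' | h') <;> simp at h'
      · rintro ⟨⟨hlen, _⟩, _⟩
        simp at hlen
        omega
    | nil =>
      constructor
      · rintro (h' | h' | h' | h' | h' | h' | h' | h') <;>
          (rw [List.cons.injEq] at h'; obtain ⟨hc, -⟩ := h'; subst hc) <;>
          exact ⟨⟨by simp, by decide⟩, by decide⟩
      · rintro ⟨⟨-, hlo⟩, hhi⟩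
        rw [singleton_le_singleton] at hlo hhi
        by_cases hA : c = 'A' <;> by_cases hB : c = 'B' <;> by_cases hC : c = 'C' <;>
          by_cases hD : c = 'D' <;> by_cases hE : c = 'E' <;> by_cases hF : c = 'F' <;>
          by_cases hG : c = 'G' <;> by_cases hH : c = 'H' <;>
          first
          | (exact absurd ⟨hlo, hhi⟩ (char_range_of_ne c hA hB hC hD hE hF hG hH))
          | simp_all

-- ===== VERDICT (by name: the statement is the Claim_ definition above) =====
theorem validarCoordX_spec : Claim_equal_validarCoordX := by
  intro coordX _
  unfold Spec_validarCoordX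
  exact validarCoordX_eq_alt coordX
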